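-- pv_equiv track=rewrite | github.com/Lucas-Granucci/ScienceAcrossLanguages | src/evaluation.py | _align_triplets
-- ===== SOURCE A (Python) =====
-- from typing import Dict, List, Tuple
--
-- def _align_triplets(
--     src: List[str],
--     ref: List[str],
--     system_mt: Dict[str, List[str]],
-- ) -> Tuple[List[str], List[str], Dict[str, List[str]]]:
--     if not system_mt:
--         return [], [], {}
--
--     lengths = {len(v) for v in system_mt.values()}
--     lengths.add(len(src))
--     lengths.add(len(ref))
--     if len(lengths) != 1:
--         raise ValueError("Source, reference, and MT lengths must match across systems")
--
--     keep_indices = []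
--     for i in range(len(src)):
--         if not src[i] or not ref[i]:
--             continue
--         if any(not mt_list[i] for mt_list in system_mt.values()):
--             continue
--         keep_indices.append(i)
--
--     aligned_src = [src[i] for i in keep_indices]
--     aligned_ref = [ref[i] for i in keep_indices]
--     aligned_mt = {name: [mt[i] for i in keep_indices] for name, mt in system_mt.items()}
--     return aligned_src, aligned_ref, aligned_mt
-- ===== SOURCE B (Python) =====
-- from typing import Dict, List, Tuple
--
-- def _align_triplets(
--     src: List[str],
--     ref: List[str],
--     system_mt: Dict[str, List[str]],
-- ) -> Tuple[List[str], List[str], Dict[str, List[str]]]: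
--     if not system_mt:
--         return [], [], {}
--
--     lengths = {len(v) for v in system_mt.values()}
--     lengths.add(len(src))
--     lengths.add(len(ref))
--     if len(lengths) != 1:
--         raise ValueError("Source, reference, and MT lengths must match across systems")
--
--     names = list(system_mt)
--     aligned_src: List[str] = []
--     aligned_ref: List[str] = []
--     aligned_mt: Dict[str, List[str]] = {name: [] for name in names}
--     for s, r, *mts in zip(src, ref, *system_mt.values()):
--         if s and r and all(mts):
--             aligned_src.append(s)
--             aligned_ref.append(r)
--             for name, mt in zip(names, mts):
--                 aligned_mt[name].append(mt)
--     return aligned_src, aligned_ref, aligned_mt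
-- ===== Notes on version B (the rewrite author's own statement) =====
-- stated objective: alternative
-- what changed: B replaces the keep_indices index list and the four separate index-gathering passes by a single streaming pass over zip(src, ref, *system_mt.values()) that appends each kept row's fields directly into pre-initialized accumulators.
import Mathlib
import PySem

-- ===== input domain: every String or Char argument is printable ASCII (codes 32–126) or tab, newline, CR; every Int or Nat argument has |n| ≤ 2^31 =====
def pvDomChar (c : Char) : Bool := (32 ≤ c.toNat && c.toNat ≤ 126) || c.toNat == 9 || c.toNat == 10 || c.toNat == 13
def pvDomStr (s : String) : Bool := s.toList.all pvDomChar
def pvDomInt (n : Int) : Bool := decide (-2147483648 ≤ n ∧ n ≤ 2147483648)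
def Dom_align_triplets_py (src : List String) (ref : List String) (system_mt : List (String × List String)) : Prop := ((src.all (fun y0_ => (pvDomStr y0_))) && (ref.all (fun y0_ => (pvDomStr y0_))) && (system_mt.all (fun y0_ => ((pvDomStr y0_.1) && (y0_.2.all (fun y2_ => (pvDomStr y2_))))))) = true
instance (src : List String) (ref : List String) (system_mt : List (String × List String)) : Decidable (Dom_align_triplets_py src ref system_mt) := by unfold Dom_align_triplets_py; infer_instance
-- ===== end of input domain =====

-- B streams row tuples (zip over src/ref and all MT columns) into pre-initialized accumulators,
-- replacing A's keep_indices list and four index-gathering passes (objective: alternative).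


-- ===== PORT A =====
-- literal port of A: build keep_indices by a fold over range(len(src)), then four gather passes
def align_triplets_py (src : List String) (ref : List String) (system_mt : List (String × List String)) : List String × List String × (List (String × List String)) :=
  if system_mt = [] then ([], [], [])
  else
    let keep : List Nat := (List.range src.length).foldl (fun acc i =>
      if !(src.getD i "" == "") && !(ref.getD i "" == "") &&
         !(system_mt.any (fun p => p.2.getD i "" == ""))
      then acc ++ [i] else acc) []
    (keep.map (fun i => src.getD i ""),
     keep.map (fun i => ref.getD i ""),
     system_mt.map (fun p => (p.1, keep.map (fun i => p.2.getD i ""))))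

-- ===== PORT B =====
-- B's streaming pass: walk src/ref and all MT columns in lockstep, consing kept rows' fields
def altCollect (ss rs : List String) (cols : List (List String)) :
    List String × List String × List (List String) :=
  match ss, rs with
  | s :: ss', r :: rs' =>
    if cols.all (fun c => !c.isEmpty) then
      let mts := cols.map (fun c => c.headD "")
      let rest := altCollect ss' rs' (cols.map List.tail)
      if !(s == "") && !(r == "") && mts.all (fun m => !(m == "")) then
        (s :: rest.1, r :: rest.2.1, List.zipWith (fun m col => m :: col) mts rest.2.2)
      else rest
    else ([], [], cols.map (fun _ => []))
  | _, _ => ([], [], cols.map (fun _ => []))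

def align_triplets_py_alt (src : List String) (ref : List String) (system_mt : List (String × List String)) : List String × List String × (List (String × List String)) :=
  if system_mt = [] then ([], [], [])
  else
    let r := altCollect src ref (system_mt.map Prod.snd)
    (r.1, r.2.1, List.zipWith (fun p c => (p.1, c)) system_mt r.2.2)

-- ===== PRECONDITION & SPEC =====
-- Pre_ excludes exactly the inputs where A raises ValueError (nonempty system_mt with mismatched lengths)
def Pre_align_triplets_py (src : List String) (ref : List String) (system_mt : List (String × List String)) : Prop :=
  system_mt = [] ∨ (ref.length = src.length ∧ ∀ p ∈ system_mt, p.2.length = src.length)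
instance (src : List String) (ref : List String) (system_mt : List (String × List String)) : Decidable (Pre_align_triplets_py src ref system_mt) := by unfold Pre_align_triplets_py; infer_instance

def pvWitness_align_triplets_py : List String × List String × (List (String × List String)) :=
  (["hello", "", "c"], ["x", "y", "z"], [("sysA", ["a", "b", "c"]), ("sysB", ["d", "e", ""])])

def Spec_align_triplets_py (src : List String) (ref : List String) (system_mt : List (String × List String)) (out : List String × List String × (List (String × List String))) : Prop := out = align_triplets_py_alt src ref system_mt
instance (src : List String) (ref : List String) (system_mt : List (String × List String)) (out : List String × List String × (List (String × List String))) : Decidable (Spec_align_triplets_py src ref system_mt out) := by unfold Spec_align_triplets_py; infer_instance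

-- ===== CLAIM (what is proved, stated in full; the proofs are below) =====
def Claim_equal_align_triplets_py : Prop := ∀ (src : List String) (ref : List String) (system_mt : List (String × List String)), Dom_align_triplets_py src ref system_mt → Pre_align_triplets_py src ref system_mt → Spec_align_triplets_py src ref system_mt (align_triplets_py src ref system_mt)

-- ===== LEMMAS AND PROOFS =====

theorem tail_getD (c : List String) (i : Nat) : c.tail.getD i "" = c.getD (i+1) "" := by
  cases c <;> simp

theorem headD_eq_getD (c : List String) : c.headD "" = c.getD 0 "" := by
  cases c <;> simp

theorem zipWith_map_same {α β γ δ : Type} (f : β → γ → δ) (g : α → β) (h : α → γ) (l : List α) :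
    List.zipWith f (l.map g) (l.map h) = l.map (fun x => f (g x) (h x)) := by
  induction l with
  | nil => rfl
  | cons a t ih => simp [ih]

theorem zipWith_self_map {α γ δ : Type} (f : α → γ → δ) (h : α → γ) (l : List α) :
    List.zipWith f l (l.map h) = l.map (fun x => f x (h x)) := by
  induction l with
  | nil => rfl
  | cons a t ih => simp [ih]

-- the filter predicate shared by both characterizations
def keepP (ss rs : List String) (cols : List (List String)) (i : Nat) : Bool :=
  !(ss.getD i "" == "") && !(rs.getD i "" == "") && !(cols.any (fun c => c.getD i "" == ""))

theorem altCollect_eq (ss : List String) : ∀ (rs : List String) (cols : List (List String)),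
    rs.length = ss.length → (∀ c ∈ cols, c.length = ss.length) →
    altCollect ss rs cols =
      (((List.range ss.length).filter (keepP ss rs cols)).map (fun i => ss.getD i ""),
       ((List.range ss.length).filter (keepP ss rs cols)).map (fun i => rs.getD i ""),
       cols.map (fun c => ((List.range ss.length).filter (keepP ss rs cols)).map (fun i => c.getD i ""))) := by
  induction ss with
  | nil =>
    intro rs cols hr hc
    simp [altCollect]
  | cons s ss' ih =>
    intro rs cols hr hc
    match rs, hr with
    | r :: rs', hr =>
      have hne : ∀ c ∈ cols, c ≠ [] := by
        intro c hcm h0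
        have := hc c hcm; simp [h0] at this
      have hall : cols.all (fun c => !c.isEmpty) = true := by
        simp only [List.all_eq_true]
        intro c hcm
        simp [hne c hcm]
      have hshift : ∀ i, keepP (s :: ss') (r :: rs') cols (i+1)
          = keepP ss' rs' (cols.map List.tail) i := by
        intro i
        simp only [keepP, List.getD_cons_succ, List.any_map]
        congr 2
        congr 1
        funext c
        simp [tail_getD]
      have hIH := ih rs' (cols.map List.tail)
        (by simpa using hr)
        (by
          intro c hcm
          rcases List.mem_map.mp hcm with ⟨c0, hc0, rfl⟩
          have := hc c0 hc0
          cases c0 with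
          | nil => exact absurd rfl (hne _ hc0)
          | cons a t => simpa using this)
      have hrange : (List.range (s :: ss').length).filter (keepP (s :: ss') (r :: rs') cols)
          = (if keepP (s :: ss') (r :: rs') cols 0 then [0] else [])
            ++ (((List.range ss'.length).filter (keepP ss' rs' (cols.map List.tail))).map (· + 1)) := by
        have : (s :: ss').length = ss'.length + 1 := rfl
        rw [this, List.range_succ_eq_map]
        rw [List.filter_cons]
        have : (List.map Nat.succ (List.range ss'.length)).filter (keepP (s :: ss') (r :: rs') cols)
            = ((List.range ss'.length).filter (fun i => keepP (s :: ss') (r :: rs') cols (i+1))).map (· + 1) := by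
          rw [List.filter_map]; rfl
        rw [this]
        simp only [hshift]
        split <;> simp
      have hhead : (cols.map (fun c => c.headD "")).all (fun m => !(m == ""))
          = !(cols.any (fun c => c.getD 0 "" == "")) := by
        simp only [List.all_eq_not_any_not, List.any_map]
        congr 1
        congr 1
        funext c
        cases c <;> simp
      have hk0 : (!(s == "") && !(r == "") && (cols.map (fun c => c.headD "")).all (fun m => !(m == "")))
          = keepP (s :: ss') (r :: rs') cols 0 := by
        simp only [keepP, hhead]; rfl
      show altCollect (s :: ss') (r :: rs') cols = _
      rw [altCollect]
      simp only [hall, if_true, hIH, hk0, hrange]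
      by_cases hkeep : keepP (s :: ss') (r :: rs') cols 0 = true
      · simp only [hkeep, if_true]
        refine Prod.ext ?_ (Prod.ext ?_ ?_)
        · simp [List.map_map]
        · simp [List.map_map]
        · simp only [List.map_map]
          rw [show (fun c => c.headD "") = (fun c : List String => c.getD 0 "") from funext headD_eq_getD]
          rw [zipWith_map_same]
          apply List.map_congr_left
          intro c hcm
          simp [List.map_map, Function.comp_def]
      · rw [Bool.not_eq_true] at hkeep
        simp only [hkeep, if_false]
        refine Prod.ext ?_ (Prod.ext ?_ ?_)
        · simp [List.map_map]
        · simp [List.map_map]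
        · simp only [List.map_map]
          apply List.map_congr_left
          intro c hcm
          simp [List.map_map, Function.comp_def]

-- ===== VERDICT (by name: the statement is the Claim_ definition above) =====
theorem align_triplets_py_spec : Claim_equal_align_triplets_py := by
  intro src ref system_mt _hdom hpre
  unfold Spec_align_triplets_py align_triplets_py align_triplets_py_alt
  by_cases hmt : system_mt = []
  · simp [hmt]
  · simp only [hmt, if_false]
    rcases hpre with h | ⟨hr, hc⟩
    · exact absurd h hmt
    have hcols : ∀ c ∈ system_mt.map Prod.snd, c.length = src.length := by
      intro c hcm
      rcases List.mem_map.mp hcm with ⟨p, hp, rfl⟩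
      exact hc p hp
    rw [altCollect_eq src ref (system_mt.map Prod.snd) hr hcols]
    have hP : keepP src ref (system_mt.map Prod.snd) = (fun i =>
        !(src.getD i "" == "") && !(ref.getD i "" == "") &&
        !(system_mt.any (fun p => p.2.getD i "" == ""))) := by
      funext i
      simp [keepP, List.any_map, Function.comp_def]
    have hfold : (List.range src.length).foldl (fun acc i =>
        if !(src.getD i "" == "") && !(ref.getD i "" == "") &&
           !(system_mt.any (fun p => p.2.getD i "" == ""))
        then acc ++ [i] else acc) []
        = (List.range src.length).filter (keepP src ref (system_mt.map Prod.snd)) := by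
      rw [hP]
      simpa using PySem.List.foldl_append_if_eq_filter
        (fun i => !(src.getD i "" == "") && !(ref.getD i "" == "") &&
           !(system_mt.any (fun p => p.2.getD i "" == "")))
        (List.range src.length) ([] : List Nat)
    simp only [hfold]
    refine Prod.ext rfl (Prod.ext rfl ?_)
    simp only [List.map_map]
    rw [zipWith_self_map]
    simp
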